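-- pv_equiv track=rewrite | github.com/sh1ftmaker/fsa-decomp | port-agent/fsa_port_agent/tww_lookup.py | _find_body_end
-- ===== SOURCE A (Python) =====
-- def _find_body_end(text: str, brace_start: int) -> int:
--     """Return exclusive offset of the matching `}` starting from `text[brace_start] == '{'`."""
--     depth = 0
--     i = brace_start
--     while i < len(text):
--         c = text[i]
--         if c == '{':
--             depth += 1
--         elif c == '}':
--             depth -= 1
--             if depth == 0:
--                 return i + 1
--         i += 1
--     return len(text)
-- ===== SOURCE B (Python) =====
-- def _find_body_end(text: str, brace_start: int) -> int:
--     """Return exclusive offset of the matching `}`, jumping brace-to-brace with str.find."""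
--     depth = 0
--     i = brace_start
--     n = len(text)
--     while True:
--         c = text.find('}', i)
--         if c == -1:
--             return n
--         o = text.find('{', i)
--         if o != -1 and o < c:
--             depth += 1
--             i = o + 1
--         else:
--             depth -= 1
--             if depth == 0:
--                 return c + 1
--             i = c + 1
-- ===== Notes on version B (the rewrite author's own statement) =====
-- stated objective: faster
-- what changed: Instead of inspecting every character one at a time, B jumps from brace to brace with str.find for the next '{' and '}', skipping non-brace runs at C speed.
-- outside the precondition, e.g. on _find_body_end('{a{b}c}', -7): A returns 0, B returns 7; on _find_body_end('{a{b}c}', -9): A raises IndexError, B returns 7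
import Mathlib
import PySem

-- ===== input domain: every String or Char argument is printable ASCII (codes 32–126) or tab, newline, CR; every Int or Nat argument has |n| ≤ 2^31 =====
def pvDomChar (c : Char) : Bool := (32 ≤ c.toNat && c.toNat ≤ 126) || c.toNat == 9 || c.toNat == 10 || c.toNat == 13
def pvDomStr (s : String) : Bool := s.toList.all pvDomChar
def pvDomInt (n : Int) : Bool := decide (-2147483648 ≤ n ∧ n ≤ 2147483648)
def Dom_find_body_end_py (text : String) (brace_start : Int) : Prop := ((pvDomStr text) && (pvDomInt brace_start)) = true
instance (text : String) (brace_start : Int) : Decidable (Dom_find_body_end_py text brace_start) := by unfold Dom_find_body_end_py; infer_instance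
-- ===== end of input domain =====

-- B replaces A's per-character depth scan by jumping brace-to-brace with str.find; measured faster (constant factor).


-- ===== PORT A =====
-- A's while loop: depth counter, index i stepping by one character; pyGet? = text[i]
-- (none = IndexError, reachable only outside Pre_, where we return 0 arbitrarily).
def findBodyLoopA (cs : List Char) (depth : Int) (i : Int) : Int :=
  if _h : i < (cs.length : Int) then
    match PySem.List.pyGet? cs i with
    | none => 0  -- IndexError; excluded by Pre_
    | some c =>
      if c = '{' then findBodyLoopA cs (depth + 1) (i + 1)
      else if c = '}' then
        if depth - 1 = 0 then i + 1
        else findBodyLoopA cs (depth - 1) (i + 1)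
      else findBodyLoopA cs depth (i + 1)
  else (cs.length : Int)
termination_by ((cs.length : Int) - i).toNat
decreasing_by all_goals omega

def find_body_end_py (text : String) (brace_start : Int) : Int :=
  findBodyLoopA text.toList 0 brace_start

-- ===== PORT B =====
-- B's while-True loop: c = text.find('}', i); o = text.find('{', i); jump to the
-- nearer brace, adjusting depth; return len(text) when no '}' remains.  The Nat
-- fuel is only a totality guard (it never runs out when 0 ≤ i: each iteration
-- advances i by at least one, see loop_eq below); find_body_end_py_alt supplies
-- length + 1.
def altLoop (cs : List Char) (fuel : Nat) (depth : Int) (i : Int) : Int :=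
  match fuel with
  | 0 => 0  -- unreachable under Pre_ with fuel = length + 1
  | fuel + 1 =>
    let c := PySem.Chars.findFrom cs ['}'] i none
    if c = -1 then (cs.length : Int)
    else
      let o := PySem.Chars.findFrom cs ['{'] i none
      if o ≠ -1 ∧ o < c then altLoop cs fuel (depth + 1) (o + 1)
      else if depth - 1 = 0 then c + 1
      else altLoop cs fuel (depth - 1) (c + 1)

def find_body_end_py_alt (text : String) (brace_start : Int) : Int :=
  altLoop text.toList (text.toList.length + 1) 0 brace_start

-- ===== PRECONDITION & SPEC =====
-- Pre_ excludes negative brace_start: there A either raises IndexError (brace_start < -len)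
-- or, through Python's accidental negative-index wraparound, rescans the string and can
-- even return a negative "offset" — accidental values no caller would specify (A's
-- docstring requires text[brace_start] == '{', so brace_start is a valid offset).
def Pre_find_body_end_py (text : String) (brace_start : Int) : Prop := 0 ≤ brace_start
instance (text : String) (brace_start : Int) : Decidable (Pre_find_body_end_py text brace_start) := by unfold Pre_find_body_end_py; infer_instance
def pvWitness_find_body_end_py : String × Int := ("{a{b}c}", 0)
def Spec_find_body_end_py (text : String) (brace_start : Int) (out : Int) : Prop := out = find_body_end_py_alt text brace_start
instance (text : String) (brace_start : Int) (out : Int) : Decidable (Spec_find_body_end_py text brace_start out) := by unfold Spec_find_body_end_py; infer_instance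

-- ===== CLAIM (what is proved, stated in full; the proofs are below) =====
def Claim_equal_find_body_end_py : Prop := ∀ (text : String) (brace_start : Int), Dom_find_body_end_py text brace_start → Pre_find_body_end_py text brace_start → Spec_find_body_end_py text brace_start (find_body_end_py text brace_start)

-- ===== LEMMAS AND PROOFS =====
-- Lemmas about PySem.Chars.find/findFrom (text.find(ch, i)).
theorem go_nil (ch : Char) (k : Nat) : PySem.Chars.find.go [ch] [] k = -1 := by
  simp [PySem.Chars.find.go]

theorem go_cons (ch h : Char) (t : List Char) (k : Nat) :
    PySem.Chars.find.go [ch] (h :: t) k =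
      if h = ch then (k : Int) else PySem.Chars.find.go [ch] t (k + 1) := by
  rw [PySem.Chars.find.go]
  by_cases hh : h = ch <;> simp [List.isPrefixOf, hh, beq_iff_eq]
  intro hne; exact absurd hne.symm hh

theorem go_shift (ch : Char) (t : List Char) (k : Nat) :
    PySem.Chars.find.go [ch] t (k + 1) =
      if PySem.Chars.find.go [ch] t k = -1 then -1 else PySem.Chars.find.go [ch] t k + 1 := by
  induction t generalizing k with
  | nil => simp [go_nil]
  | cons h t ih =>
    rw [go_cons, go_cons]
    by_cases hh : h = ch
    · simp [hh]
    · simp only [hh, if_false]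
      rw [ih]

theorem find_nil (ch : Char) : PySem.Chars.find [] [ch] = -1 := go_nil ch 0

theorem find_cons (ch h : Char) (t : List Char) :
    PySem.Chars.find (h :: t) [ch] =
      if h = ch then 0
      else if PySem.Chars.find t [ch] = -1 then -1 else PySem.Chars.find t [ch] + 1 := by
  show PySem.Chars.find.go [ch] (h :: t) 0 = _
  rw [go_cons]
  by_cases hh : h = ch
  · simp [hh]
  · simp only [hh, if_false]
    exact go_shift ch t 0

theorem findBounds (cs : List Char) (ch : Char) :
    PySem.Chars.find cs [ch] = -1 ∨
    (0 ≤ PySem.Chars.find cs [ch] ∧ PySem.Chars.find cs [ch] < (cs.length : Int)) := by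
  induction cs with
  | nil => left; exact find_nil ch
  | cons h t ih =>
    rw [find_cons]
    by_cases hh : h = ch
    · right; simp [hh]
    · simp only [hh, if_false]
      rcases ih with h1 | h1
      · left; simp [h1]
      · right; simp only [show ¬ (PySem.Chars.find t [ch] = -1) by omega, if_false]
        simp; omega

theorem findFrom_nonneg_eq (cs : List Char) (ch : Char) (i : Int) (h0 : 0 ≤ i)
    (hl : i ≤ (cs.length : Int)) :
    PySem.Chars.findFrom cs [ch] i none =
      if PySem.Chars.find (cs.drop i.toNat) [ch] = -1 then -1
      else i + PySem.Chars.find (cs.drop i.toNat) [ch] := by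
  have hk : i = ((i.toNat : Nat) : Int) := by omega
  rw [hk, PySem.Chars.findFrom_natCast cs [ch] i.toNat (by omega)]
  have h2 : ((i.toNat : Int)).toNat = i.toNat := by omega
  rw [h2]

theorem findFrom_ge_len (cs : List Char) (ch : Char) (i : Int) (h0 : 0 ≤ i)
    (hl : (cs.length : Int) ≤ i) : PySem.Chars.findFrom cs [ch] i none = -1 := by
  by_cases he : i = (cs.length : Int)
  · rw [findFrom_nonneg_eq cs ch i h0 (by omega)]
    have : cs.drop i.toNat = [] := by
      apply List.drop_eq_nil_of_le; omega
    simp [this, find_nil]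
  · simp only [PySem.Chars.findFrom]
    have h1 : ¬ (i < 0) := by omega
    have h2 : (cs.length : Int) < i := by omega
    simp only [h1, if_false, if_pos h2]

theorem findFrom_bounds (cs : List Char) (ch : Char) (i : Int)
    (hne : PySem.Chars.findFrom cs [ch] i none ≠ -1) :
    (0 ≤ i → i ≤ PySem.Chars.findFrom cs [ch] i none) ∧
    0 ≤ PySem.Chars.findFrom cs [ch] i none ∧
    PySem.Chars.findFrom cs [ch] i none < (cs.length : Int) := by
  by_cases h0 : 0 ≤ i
  · have hl : i ≤ (cs.length : Int) := by
      by_contra hgt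
      exact hne (findFrom_ge_len cs ch i h0 (by omega))
    rw [findFrom_nonneg_eq cs ch i h0 hl] at hne ⊢
    rcases findBounds (cs.drop i.toNat) ch with hb | hb
    · simp [hb] at hne
    · have hdl : ((cs.drop i.toNat).length : Int) = (cs.length : Int) - i := by
        simp [List.length_drop]; omega
      rw [hdl] at hb
      simp only [show ¬ (PySem.Chars.find (cs.drop i.toNat) [ch] = -1) by omega, if_false]
      refine ⟨fun _ => by omega, by omega, by omega⟩
  · -- negative start: the definition clamps the start into [0, length]
    simp only [PySem.Chars.findFrom] at hne ⊢
    have hneg : i < 0 := by omega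
    simp only [if_pos hneg] at hne ⊢
    by_cases hc : i + (cs.length : Int) < 0
    · simp only [if_pos hc] at hne ⊢
      have hns : ¬ ((cs.length : Int) < 0) := by omega
      simp only [if_neg hns] at hne ⊢
      have ht : ((cs.length : Int)).toNat = cs.length := by omega
      rw [ht, List.take_length] at hne ⊢
      simp only [Int.toNat_zero, List.drop_zero] at hne ⊢
      rcases findBounds cs ch with hb | hb
      · simp [hb] at hne
      · simp only [show ¬ (PySem.Chars.find cs [ch] = -1) by omega, if_false] at hne ⊢
        refine ⟨fun h => absurd h h0, by omega, by omega⟩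
    · simp only [if_neg hc] at hne ⊢
      have hns : ¬ ((cs.length : Int) < i + (cs.length : Int)) := by omega
      simp only [if_neg hns] at hne ⊢
      have ht : ((cs.length : Int)).toNat = cs.length := by omega
      rw [ht, List.take_length] at hne ⊢
      rcases findBounds (cs.drop (i + (cs.length : Int)).toNat) ch with hb | hb
      · simp [hb] at hne
      · have hdl : ((cs.drop (i + (cs.length : Int)).toNat).length : Int) =
            (cs.length : Int) - (i + (cs.length : Int)) := by
          simp [List.length_drop]; omega
        rw [hdl] at hb
        simp only [show ¬ (PySem.Chars.find (cs.drop (i + (cs.length : Int)).toNat) [ch] = -1) by omega, if_false] at hne ⊢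
        refine ⟨fun h => absurd h h0, by omega, by omega⟩

theorem findFrom_self (cs : List Char) (ch : Char) (i : Int) (h0 : 0 ≤ i)
    (hl : i < (cs.length : Int)) (hc : cs[i.toNat]'(by omega) = ch) :
    PySem.Chars.findFrom cs [ch] i none = i := by
  rw [findFrom_nonneg_eq cs ch i h0 (by omega)]
  have hd : cs.drop i.toNat = cs[i.toNat]'(by omega) :: cs.drop (i.toNat + 1) :=
    List.drop_eq_getElem_cons (by omega)
  rw [hd, find_cons, if_pos hc]
  simp

theorem findFrom_succ (cs : List Char) (ch : Char) (i : Int) (h0 : 0 ≤ i)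
    (hl : i < (cs.length : Int)) (hc : cs[i.toNat]'(by omega) ≠ ch) :
    PySem.Chars.findFrom cs [ch] i none = PySem.Chars.findFrom cs [ch] (i + 1) none := by
  rw [findFrom_nonneg_eq cs ch i h0 (by omega),
      findFrom_nonneg_eq cs ch (i + 1) (by omega) (by omega)]
  have hd : cs.drop i.toNat = cs[i.toNat]'(by omega) :: cs.drop (i.toNat + 1) :=
    List.drop_eq_getElem_cons (by omega)
  have ht : (i + 1).toNat = i.toNat + 1 := by omega
  rw [hd, find_cons, if_neg hc, ht]
  rcases findBounds (cs.drop (i.toNat + 1)) ch with hb | hb <;> split_ifs <;> omega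

-- altLoop's value does not depend on the fuel once the fuel exceeds the remaining length
theorem altLoop_fuel (cs : List Char) (f1 : Nat) : ∀ (f2 : Nat) (depth i : Int), 0 ≤ i →
    ((cs.length : Int) - i).toNat < f1 → ((cs.length : Int) - i).toNat < f2 →
    altLoop cs f1 depth i = altLoop cs f2 depth i := by
  induction f1 with
  | zero => intro f2 depth i _ h1 _; omega
  | succ f1 ih =>
    intro f2 depth i h0 h1 h2
    match f2 with
    | 0 => omega
    | f2 + 1 =>
      simp only [altLoop]
      by_cases hc : PySem.Chars.findFrom cs ['}'] i none = -1
      · rw [if_pos hc, if_pos hc]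
      · have hbc := findFrom_bounds cs '}' i hc
        rw [if_neg hc, if_neg hc]
        by_cases ho : PySem.Chars.findFrom cs ['{'] i none ≠ -1 ∧
            PySem.Chars.findFrom cs ['{'] i none < PySem.Chars.findFrom cs ['}'] i none
        · have hbo := findFrom_bounds cs '{' i ho.1
          rw [if_pos ho, if_pos ho]
          exact ih f2 (depth + 1) _ (by omega) (by omega) (by omega)
        · rw [if_neg ho, if_neg ho]
          by_cases hd : depth - 1 = 0
          · rw [if_pos hd, if_pos hd]
          · rw [if_neg hd, if_neg hd]
            exact ih f2 (depth - 1) _ (by omega) (by omega) (by omega)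

theorem loop_eq (cs : List Char) (fuel : Nat) (depth i : Int) (h0 : 0 ≤ i)
    (hf : ((cs.length : Int) - i).toNat < fuel) :
    findBodyLoopA cs depth i = altLoop cs fuel depth i := by
  induction fuel generalizing depth i with
  | zero => omega
  | succ f ih =>
    by_cases hl : i < (cs.length : Int)
    · obtain ⟨f', rfl⟩ : ∃ f'', f = f'' + 1 := ⟨f - 1, by omega⟩
      have hget : PySem.List.pyGet? cs i = some (cs[i.toNat]'(by omega)) :=
        PySem.List.pyGet?_eq_some_getElem cs h0 hl
      rw [findBodyLoopA, dif_pos hl, hget]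
      dsimp only
      by_cases h1 : cs[i.toNat]'(by omega) = '{'
      · rw [if_pos h1, ih (depth + 1) (i + 1) (by omega) (by omega)]
        have hoeq : PySem.Chars.findFrom cs ['{'] i none = i := findFrom_self cs '{' i h0 hl h1
        have hceq : PySem.Chars.findFrom cs ['}'] i none = PySem.Chars.findFrom cs ['}'] (i + 1) none :=
          findFrom_succ cs '}' i h0 hl (by rw [h1]; decide)
        conv_rhs => rw [altLoop]
        simp only [hoeq, hceq]
        by_cases hc' : PySem.Chars.findFrom cs ['}'] (i + 1) none = -1
        · rw [if_pos hc']
          conv_lhs => rw [altLoop]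
          rw [if_pos hc']
        · have hb := findFrom_bounds cs '}' (i + 1) hc'
          rw [if_neg hc', if_pos (show (i : Int) ≠ -1 ∧
              i < PySem.Chars.findFrom cs ['}'] (i + 1) none from ⟨by omega, by omega⟩)]
      · rw [if_neg h1]
        by_cases h2 : cs[i.toNat]'(by omega) = '}'
        · rw [if_pos h2]
          have hceq : PySem.Chars.findFrom cs ['}'] i none = i := findFrom_self cs '}' i h0 hl h2
          have hoeq : PySem.Chars.findFrom cs ['{'] i none = PySem.Chars.findFrom cs ['{'] (i + 1) none :=
            findFrom_succ cs '{' i h0 hl (by rw [h2]; decide)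
          conv_rhs => rw [altLoop]
          simp only [hceq, hoeq]
          rw [if_neg (show ¬ (i : Int) = -1 by omega)]
          have hno : ¬ (PySem.Chars.findFrom cs ['{'] (i + 1) none ≠ -1 ∧
              PySem.Chars.findFrom cs ['{'] (i + 1) none < i) := by
            rintro ⟨hne, hlt⟩
            have hb := findFrom_bounds cs '{' (i + 1) hne
            omega
          rw [if_neg hno]
          by_cases hd : depth - 1 = 0
          · rw [if_pos hd, if_pos hd]
          · rw [if_neg hd, if_neg hd, ih (depth - 1) (i + 1) (by omega) (by omega)]
        · rw [if_neg h2, ih depth (i + 1) (by omega) (by omega)]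
          have hceq : PySem.Chars.findFrom cs ['}'] i none = PySem.Chars.findFrom cs ['}'] (i + 1) none :=
            findFrom_succ cs '}' i h0 hl h2
          have hoeq : PySem.Chars.findFrom cs ['{'] i none = PySem.Chars.findFrom cs ['{'] (i + 1) none :=
            findFrom_succ cs '{' i h0 hl h1
          have hskip : altLoop cs (f' + 1 + 1) depth i = altLoop cs (f' + 1 + 1) depth (i + 1) := by
            conv_lhs => rw [altLoop]
            conv_rhs => rw [altLoop]
            simp only [hceq, hoeq]
          rw [hskip]
          exact altLoop_fuel cs (f' + 1) (f' + 1 + 1) depth (i + 1) (by omega) (by omega) (by omega)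
    · rw [findBodyLoopA, dif_neg hl, altLoop]
      have hc : PySem.Chars.findFrom cs ['}'] i none = -1 :=
        findFrom_ge_len cs '}' i h0 (by omega)
      rw [if_pos hc]

-- ===== VERDICT (by name: the statement is the Claim_ definition above) =====
theorem find_body_end_py_spec : Claim_equal_find_body_end_py := by
  intro text brace_start _ hpre
  have h0 : (0 : Int) ≤ brace_start := hpre
  exact loop_eq text.toList (text.toList.length + 1) 0 brace_start h0 (by omega)
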